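-- pv_equiv track=rewrite | github.com/chbrown/argv | argv/parser.py | flatten_argv
-- ===== SOURCE A (Python) =====
-- def flatten_flags(flags):
--     '''Turn argv-type flags strings into names of arguments.
--
--     Guarantees:
--
--     * flags will not contain an '='
--     * flags will not be '--'
--
--     Since all output will be single flags, we yield strings, rather than tuples.
--
--     | call | output |
--     |:-----|:-------|
--     | `flatten_flags('-m')` | `['m']` |
--     | `flatten_flags('-czf')` | `['c', 'z', 'f']` |
--     | `flatten_flags('--last')` | `['last']` |
--
--     N.b., those lists are actually iterables.
--     '''
--     if flags.startswith('--'):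
--         # easy, just remove the '--'
--         yield flags[2:]
--     else:
--         # short flags: yield each thing after the first '-' (handles multiple)
--         for letter in flags[1:]:
--             yield letter
--
-- def flatten_argv(argv):
--     '''Turn strings into (is_flag, value) tuples:
--
--     For an argv like this:
--
--         ['-f', 'pets.txt', '-v', 'cut', '-cz', '--lost', '--delete=sam', '--', 'lester', 'jack']
--
--     `flatten_argv` produces a list like:
--
--         [
--             (True,  'f'),
--             (False, 'pets.txt'),
--             (True,  'v'),
--             (False, 'cut'),
--             (True,  'c'),
--             (True,  'z'),
--             (True,  'lost'),
--             (True,  'delete'),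
--             (False, 'sam'),
--             (False, 'lester'),
--             (False, 'jack'),
--         ]
--
--     Todo:
--
--         ensure that 'verbose' in '--verbose -- a b c' is treated as a boolean even if not marked as one.
--     '''
--     # one pass max
--     argv = iter(argv)
--     for arg in argv:
--         if arg == '--':
--             # bleed out argv without breaking, since argv is an iterator
--             for arg in argv:
--                 yield False, arg
--         elif arg.startswith('-'):
--             # this handles both --last=man.txt and -czf=file.tgz
--             # str.partition produces a 3-tuple whether or now the separator is found
--             arg, sep, value = arg.partition('=')
--             for arg in flatten_flags(arg):
--                 yield True, arg
--             if sep: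
--                 # we don't re-flatten the 'value' from '--arg=value'
--                 yield False, value
--         else:
--             yield False, arg
-- ===== SOURCE B (Python) =====
-- def _expand(arg):
--     '''Expand one non-'--' argument into its (is_flag, value) tuples.'''
--     if arg.startswith('-'):
--         name, sep, value = arg.partition('=')
--         if name.startswith('--'):
--             out = [(True, name[2:])]
--         else:
--             out = [(True, letter) for letter in name[1:]]
--         if sep:
--             out.append((False, value))
--         return out
--     return [(False, arg)]
--
-- def flatten_argv(argv):
--     '''Staged: materialize argv, split at the first '--', flatMap the head
--     through _expand, tag everything after the separator positional.'''
--     args = list(argv)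
--     try:
--         cut = args.index('--')
--         head, tail = args[:cut], args[cut + 1:]
--     except ValueError:
--         head, tail = args, []
--     for pair in [p for a in head for p in _expand(a)] + [(False, a) for a in tail]:
--         yield pair
-- ===== Notes on version B (the rewrite author's own statement) =====
-- stated objective: alternative
-- what changed: Replaces A's stateful single-pass generator with nested iterator draining by a staged computation: materialize argv, locate the first '--' with list.index, slice into head/tail, flatMap a pure per-argument expander over the head and map the tail to positionals.
import Mathlib
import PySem

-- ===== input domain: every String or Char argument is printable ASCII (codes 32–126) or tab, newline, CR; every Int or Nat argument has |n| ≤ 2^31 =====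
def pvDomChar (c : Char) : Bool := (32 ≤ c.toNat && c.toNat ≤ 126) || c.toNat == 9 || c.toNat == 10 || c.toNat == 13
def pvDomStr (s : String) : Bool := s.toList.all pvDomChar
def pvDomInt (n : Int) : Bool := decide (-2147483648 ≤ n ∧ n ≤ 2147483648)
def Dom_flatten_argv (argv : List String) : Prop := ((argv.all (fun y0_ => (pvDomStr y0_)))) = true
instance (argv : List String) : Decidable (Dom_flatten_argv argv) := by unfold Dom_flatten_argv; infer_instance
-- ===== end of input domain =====

-- B replaces A's stateful generator (nested iterator drain after '--') by a staged
-- computation: find the first '--', slice, flatMap a pure expander; objective: alternative.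

-- ===== PORT A =====
-- str.partition('='): exact hand port (no PySem primitive): first '=' splits; sep flag is
-- True iff '=' occurs (Python's truthiness of the nonempty separator string).
def partitionEq : List Char → List Char × Bool × List Char
  | [] => ([], false, [])
  | c :: rest =>
    if c = '=' then ([], true, rest)
    else
      let (b, s, a) := partitionEq rest
      (c :: b, s, a)

-- port of the generator flatten_flags (list of yielded strings)
def flatten_flags (flags : List Char) : List String :=
  if PySem.Chars.startswith flags ['-', '-'] then [String.ofList (flags.drop 2)]
  else (flags.drop 1).map (fun letter => String.ofList [letter])

def flatten_argv : List String → List (Bool × String)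
  | [] => []
  | arg :: rest =>
    if arg = "--" then
      -- 'bleed out argv': the inner for-loop over the remaining iterator
      rest.map (fun a => (false, a))
    else if PySem.Str.startswith arg "-" then
      let (name, sep, value) := partitionEq arg.toList
      (flatten_flags name).map (fun f => (true, f))
        ++ (if sep then [(false, String.ofList value)] else [])
        ++ flatten_argv rest
    else
      (false, arg) :: flatten_argv rest

-- ===== PORT B =====
-- _expand: the pure per-argument expander of Source B
def expandArg (arg : String) : List (Bool × String) :=
  if PySem.Str.startswith arg "-" then
    let (name, sep, value) := partitionEq arg.toList
    (if PySem.Chars.startswith name ['-', '-'] then [(true, String.ofList (name.drop 2))]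
     else (name.drop 1).map (fun letter => (true, String.ofList [letter])))
      ++ (if sep then [(false, String.ofList value)] else [])
  else [(false, arg)]

-- staged: args.index('--') → slice into head/tail → flatMap head, map tail
def flatten_argv_alt (argv : List String) : List (Bool × String) :=
  match PySem.List.index? argv "--" with
  | some cut =>
      ((argv.take cut).flatMap expandArg)
        ++ ((argv.drop (cut + 1)).map (fun a => (false, a)))
  | none => (argv.flatMap expandArg) ++ []

-- ===== PRECONDITION & SPEC =====
def Spec_flatten_argv (argv : List String) (out : List (Bool × String)) : Prop := out = flatten_argv_alt argv
instance (argv : List String) (out : List (Bool × String)) : Decidable (Spec_flatten_argv argv out) := by unfold Spec_flatten_argv; infer_instance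

-- ===== CLAIM =====
def Claim_equal_flatten_argv : Prop := ∀ (argv : List String), Dom_flatten_argv argv → Spec_flatten_argv argv (flatten_argv argv)

-- ===== LEMMAS AND PROOFS =====

-- A's flatten_flags output tagged True is B's inlined flag list
lemma flags_eq (name : List Char) :
    (if PySem.Chars.startswith name ['-', '-'] then [(true, String.ofList (name.drop 2))]
     else (name.drop 1).map (fun letter => (true, String.ofList [letter])))
      = (flatten_flags name).map (fun f => (true, f)) := by
  unfold flatten_flags
  split <;> simp [Function.comp_def]

-- one step of A on a non-'--' argument is B's expander
lemma flatten_argv_cons (arg : String) (rest : List String) (h : arg ≠ "--") :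
    flatten_argv (arg :: rest) = expandArg arg ++ flatten_argv rest := by
  by_cases hd : PySem.Str.startswith arg "-" = true
  · rcases hp : partitionEq arg.toList with ⟨name, sep, value⟩
    simp only [flatten_argv, expandArg, h, hd, hp, if_false, if_true, flags_eq]
    try simp
  · simp only [flatten_argv, expandArg, h, hd, if_false]
    simp

-- B skips a non-'--' head element by expanding it in front
lemma alt_cons (arg : String) (rest : List String) (h : arg ≠ "--") :
    flatten_argv_alt (arg :: rest) = expandArg arg ++ flatten_argv_alt rest := by
  unfold flatten_argv_alt
  rw [PySem.List.index?_cons_of_ne rest h]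
  cases hi : PySem.List.index? rest "--" with
  | none => simp
  | some i => simp [List.flatMap]

-- ===== VERDICT =====
lemma main_eq (argv : List String) : flatten_argv argv = flatten_argv_alt argv := by
  induction argv with
  | nil => rfl
  | cons arg rest ih =>
    by_cases h : arg = "--"
    · subst h
      unfold flatten_argv flatten_argv_alt
      rw [PySem.List.index?_cons_self]
      simp
    · rw [flatten_argv_cons arg rest h, alt_cons arg rest h, ih]

theorem flatten_argv_spec : Claim_equal_flatten_argv := by
  intro argv _
  exact main_eq argv
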